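-- pv_equiv track=rewrite | github.com/fletchc/rookount | multisets.py | mergeRooks
-- ===== SOURCE A (Python) =====
-- def connorAttacking(pos1, pos2):
--     if pos1[2] - pos2[2] == 0:
--         return False
--     else:
--         diff = pos1[2] - pos2[2]
--     if pos1[1] - pos2[1] == 0 and pos1[0] - pos2[0] == 0:
--         return True
--     elif pos1[1] - pos2[1] != diff:
--         return False
--     if pos1[0] - pos2[0] == diff or pos1[0] - pos2[0] == 0:
--         return True
--
-- def mergeRooks(list1, list2):
--     rooks = list2
--     lenrooks = len(rooks)
--     for rook1 in list1:
--         bad = 0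
--         for rook2 in list2:
--             if connorAttacking(rook1, rook2):
--                 bad = 1
--                 break
--         if not bad:
--             rooks.append(rook1)
--     return rooks
-- ===== SOURCE B (Python) =====
-- # B: hash-indexed merge. Attack test O(1) via three dicts keyed on the
-- # attack invariants ((x,y), (y-z,x-z), (y-z,x)), each mapping to the set of
-- # z-values present; updated incrementally as rooks are appended.
-- # Like A, mutates list2 in place (the result aliases list2).
--
-- def mergeRooks(list1, list2):
--     rooks = list2
--     by_xy = {}
--     by_diag = {}
--     by_col = {}
--
--     def add(r):
--         x, y, z = r
--         by_xy.setdefault((x, y), set()).add(z)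
--         by_diag.setdefault((y - z, x - z), set()).add(z)
--         by_col.setdefault((y - z, x), set()).add(z)
--
--     for r in list2:
--         add(r)
--
--     def hit(zs, z):
--         # some rook with this invariant on a different level z2 != z?
--         return zs is not None and (len(zs) > 1 or z not in zs)
--
--     for r in list1:
--         x, y, z = r
--         if not (hit(by_xy.get((x, y)), z)
--                 or hit(by_diag.get((y - z, x - z)), z)
--                 or hit(by_col.get((y - z, x)), z)):
--             rooks.append(r)
--             add(r)
--     return rooks
-- ===== Notes on version B (the rewrite author's own statement) =====
-- stated objective: faster
-- what changed: A rescans the whole growing rook list for each rook of list1; B keeps three hash indexes keyed on the attack invariants ((x,y), (y-z,x-z), (y-z,x)) mapping to the set of z-levels present, so each attack test is O(1) dictionary lookups and the indexes are updated incrementally as rooks are appended.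
import Mathlib
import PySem

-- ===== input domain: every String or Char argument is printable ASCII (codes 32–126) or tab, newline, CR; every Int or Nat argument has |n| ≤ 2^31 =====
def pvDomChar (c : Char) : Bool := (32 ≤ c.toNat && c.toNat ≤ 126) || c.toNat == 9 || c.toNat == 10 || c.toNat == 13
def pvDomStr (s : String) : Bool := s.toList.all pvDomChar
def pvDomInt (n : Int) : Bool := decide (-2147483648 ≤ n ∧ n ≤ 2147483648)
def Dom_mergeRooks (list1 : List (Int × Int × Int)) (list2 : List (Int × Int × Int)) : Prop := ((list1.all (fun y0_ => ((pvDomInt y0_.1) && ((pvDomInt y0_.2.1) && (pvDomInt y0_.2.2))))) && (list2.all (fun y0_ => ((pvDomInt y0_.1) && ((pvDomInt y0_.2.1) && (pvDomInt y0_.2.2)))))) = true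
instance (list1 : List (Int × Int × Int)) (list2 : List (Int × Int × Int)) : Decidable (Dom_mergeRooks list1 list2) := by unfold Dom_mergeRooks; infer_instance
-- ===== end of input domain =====

-- B replaces A's inner scan over the (growing) rook list by three hash indexes
-- keyed on the attack invariants ((x,y), (y-z,x-z), (y-z,x)), updated incrementally.
-- Both A and B mutate list2 in place in Python (the result aliases list2); the
-- equivalence proved here is about the return value.


-- ===== PORT A =====
-- Python returns None (falsy) when it falls off the end; ported as false (only used truthily).
def connorAttacking (pos1 pos2 : Int × Int × Int) : Bool :=
  if pos1.2.2 - pos2.2.2 == 0 then false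
  else
    let diff := pos1.2.2 - pos2.2.2
    if pos1.2.1 - pos2.2.1 == 0 && pos1.1 - pos2.1 == 0 then true
    else if pos1.2.1 - pos2.2.1 != diff then false
    else if pos1.1 - pos2.1 == diff || pos1.1 - pos2.1 == 0 then true
    else false

-- the inner 'for rook2 in list2: if connorAttacking…: bad = 1; break' loop
def badOf (rook1 : Int × Int × Int) : List (Int × Int × Int) → Int
  | [] => 0
  | rook2 :: rest => if connorAttacking rook1 rook2 then 1 else badOf rook1 rest

-- one outer-loop iteration ('lenrooks = len(rooks)' of A is unused; rooks aliases list2, so the inner loop scans the grown list)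
def aStep (rooks : List (Int × Int × Int)) (rook1 : Int × Int × Int) : List (Int × Int × Int) :=
  if badOf rook1 rooks == 0 then rooks ++ [rook1] else rooks

def mergeRooks (list1 : List (Int × Int × Int)) (list2 : List (Int × Int × Int)) : List (Int × Int × Int) :=
  list1.foldl aStep list2

-- ===== PORT B =====
-- the three indexes: (x,y) → {z}, (y-z,x-z) → {z}, (y-z,x) → {z}  (Source B's add)
def bAdd (ix : PySem.Dict (Int × Int) (PySem.Set Int) × PySem.Dict (Int × Int) (PySem.Set Int) × PySem.Dict (Int × Int) (PySem.Set Int))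
    (r : Int × Int × Int) :
    PySem.Dict (Int × Int) (PySem.Set Int) × PySem.Dict (Int × Int) (PySem.Set Int) × PySem.Dict (Int × Int) (PySem.Set Int) :=
  (ix.1.modify (r.1, r.2.1) PySem.Set.empty (fun s => PySem.Set.add s r.2.2),
   ix.2.1.modify (r.2.1 - r.2.2, r.1 - r.2.2) PySem.Set.empty (fun s => PySem.Set.add s r.2.2),
   ix.2.2.modify (r.2.1 - r.2.2, r.1) PySem.Set.empty (fun s => PySem.Set.add s r.2.2))

-- Source B's hit(zs, z): zs is not None and (len(zs) > 1 or z not in zs)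
def pyHit : Option (PySem.Set Int) → Int → Bool
  | none, _ => false
  | some zs, z => decide (1 < zs.length) || !(PySem.Set.contains zs z)

def bStep (st : List (Int × Int × Int) × PySem.Dict (Int × Int) (PySem.Set Int) × PySem.Dict (Int × Int) (PySem.Set Int) × PySem.Dict (Int × Int) (PySem.Set Int))
    (r : Int × Int × Int) :
    List (Int × Int × Int) × PySem.Dict (Int × Int) (PySem.Set Int) × PySem.Dict (Int × Int) (PySem.Set Int) × PySem.Dict (Int × Int) (PySem.Set Int) :=
  if !(pyHit (st.2.1.get? (r.1, r.2.1)) r.2.2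
       || pyHit (st.2.2.1.get? (r.2.1 - r.2.2, r.1 - r.2.2)) r.2.2
       || pyHit (st.2.2.2.get? (r.2.1 - r.2.2, r.1)) r.2.2)
  then (st.1 ++ [r], bAdd st.2 r) else st

def mergeRooks_alt (list1 : List (Int × Int × Int)) (list2 : List (Int × Int × Int)) : List (Int × Int × Int) :=
  (list1.foldl bStep (list2, list2.foldl bAdd (PySem.Dict.empty, PySem.Dict.empty, PySem.Dict.empty))).1

-- ===== PRECONDITION & SPEC =====
def Spec_mergeRooks (list1 : List (Int × Int × Int)) (list2 : List (Int × Int × Int)) (out : List (Int × Int × Int)) : Prop := out = mergeRooks_alt list1 list2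
instance (list1 : List (Int × Int × Int)) (list2 : List (Int × Int × Int)) (out : List (Int × Int × Int)) : Decidable (Spec_mergeRooks list1 list2 out) := by unfold Spec_mergeRooks; infer_instance

-- ===== CLAIM (what is proved, stated in full; the proofs are below) =====
def Claim_equal_mergeRooks : Prop := ∀ (list1 : List (Int × Int × Int)) (list2 : List (Int × Int × Int)), Dom_mergeRooks list1 list2 → Spec_mergeRooks list1 list2 (mergeRooks list1 list2)

-- ===== LEMMAS AND PROOFS =====

-- a dict is a correct index for predicate P: membership in buckets matches P, buckets are duplicate-free and nonempty
def GoodDict (d : PySem.Dict (Int × Int) (PySem.Set Int)) (P : Int × Int → Int → Prop) : Prop :=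
  (∀ k z, z ∈ d.getD k [] ↔ P k z) ∧ (∀ k s, d.get? k = some s → s.Nodup ∧ s ≠ [])

theorem GoodDict_congr {d : PySem.Dict (Int × Int) (PySem.Set Int)} {P Q : Int × Int → Int → Prop}
    (h : GoodDict d P) (hpq : ∀ k z, P k z ↔ Q k z) : GoodDict d Q :=
  ⟨fun k z => (h.1 k z).trans (hpq k z), h.2⟩

theorem GoodDict_empty : GoodDict PySem.Dict.empty (fun _ _ => False) := by
  constructor
  · intro k z; simp [PySem.Dict.getD_empty]
  · intro k s h; simp [PySem.Dict.get?_empty] at h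

theorem connor_iff (r1 r2 : Int × Int × Int) :
    connorAttacking r1 r2 = true ↔
      r1.2.2 ≠ r2.2.2 ∧ ((r1.1 = r2.1 ∧ r1.2.1 = r2.2.1) ∨
        (r1.2.1 - r2.2.1 = r1.2.2 - r2.2.2 ∧ (r1.1 - r2.1 = r1.2.2 - r2.2.2 ∨ r1.1 = r2.1))) := by
  obtain ⟨x1, y1, z1⟩ := r1
  obtain ⟨x2, y2, z2⟩ := r2
  simp only [connorAttacking, beq_iff_eq, bne_iff_ne, ne_eq, Bool.and_eq_true, Bool.or_eq_true]
  split_ifs <;> simp_all <;> omega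

theorem badOf_eq_zero_iff (rook1 : Int × Int × Int) (rooks : List (Int × Int × Int)) :
    (badOf rook1 rooks == 0) = !(rooks.any (fun r2 => connorAttacking rook1 r2)) := by
  induction rooks with
  | nil => rfl
  | cons r2 rest ih =>
    simp only [badOf, List.any_cons]
    by_cases h : connorAttacking rook1 r2 = true <;> simp [h, ih]

-- hit over a Nodup nonempty bucket = "some element differs from z"
theorem hit_set_iff (s : List Int) (z : Int) (hnd : s.Nodup) (hne : s ≠ []) :
    (decide (1 < s.length) || !(PySem.Set.contains s z)) = true ↔ ∃ w ∈ s, w ≠ z := by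
  simp only [Bool.or_eq_true, decide_eq_true_eq, Bool.not_eq_true',
    PySem.Set.contains_eq_listContains, List.contains_eq_mem, decide_eq_false_iff_not]
  constructor
  · rintro (hlen | hz)
    · match s, hnd, hlen with
      | a :: b :: t, hnd, _ =>
        have hab : a ≠ b := by simp [List.nodup_cons] at hnd; tauto
        by_cases ha : a = z
        · exact ⟨b, by simp, by simp [← ha, Ne.symm hab]⟩
        · exact ⟨a, by simp, ha⟩
    · match s, hne with
      | a :: t, _ => exact ⟨a, by simp, fun h => hz (h ▸ by simp)⟩
  · rintro ⟨w, hw, hwz⟩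
    by_cases hz : z ∈ s
    · left
      match s, hw, hz with
      | a :: t, hw, hz =>
        rcases List.mem_cons.mp hw with rfl | hw'
        · rcases List.mem_cons.mp hz with h | hz'
          · exact absurd h.symm hwz
          · have : t ≠ [] := List.ne_nil_of_mem hz'
            simp [List.length_pos_iff.mpr this]
        · have : t ≠ [] := List.ne_nil_of_mem hw'
          simp [List.length_pos_iff.mpr this]
    · exact Or.inr hz

theorem pyHit_iff {d : PySem.Dict (Int × Int) (PySem.Set Int)} {P : Int × Int → Int → Prop}
    (h : GoodDict d P) (k : Int × Int) (z : Int) :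
    pyHit (d.get? k) z = true ↔ ∃ w, w ≠ z ∧ P k w := by
  rcases hc : d.get? k with _ | s
  · have hd : d.getD k [] = [] := PySem.Dict.getD_of_get?_eq_none _ _ hc
    simp only [pyHit]
    constructor
    · intro hf; exact absurd hf (by simp)
    · rintro ⟨w, _, hp⟩
      have := (h.1 k w).mpr hp
      rw [hd] at this; simp at this
  · have hd : d.getD k [] = s := PySem.Dict.getD_of_get?_eq_some _ _ hc
    obtain ⟨hnd, hne⟩ := h.2 k s hc
    simp only [pyHit]
    rw [hit_set_iff s z hnd hne]
    constructor
    · rintro ⟨w, hw, hwz⟩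
      exact ⟨w, hwz, (h.1 k w).mp (hd ▸ hw)⟩
    · rintro ⟨w, hwz, hp⟩
      exact ⟨w, hd ▸ (h.1 k w).mpr hp, hwz⟩

theorem GoodDict_add {d : PySem.Dict (Int × Int) (PySem.Set Int)} {P : Int × Int → Int → Prop}
    (h : GoodDict d P) (k0 : Int × Int) (z0 : Int) :
    GoodDict (d.modify k0 PySem.Set.empty (fun s => PySem.Set.add s z0))
      (fun k z => P k z ∨ (k = k0 ∧ z = z0)) := by
  have hmod : d.modify k0 PySem.Set.empty (fun s => PySem.Set.add s z0)
      = d.insert k0 (PySem.Set.add (d.getD k0 []) z0) := rfl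
  have hnd : ∀ k, (d.getD k []).Nodup := by
    intro k
    rcases hc : d.get? k with _ | s
    · rw [PySem.Dict.getD_of_get?_eq_none _ _ hc]; exact List.nodup_nil
    · rw [PySem.Dict.getD_of_get?_eq_some _ _ hc]; exact (h.2 k s hc).1
  constructor
  · intro k z
    rw [hmod, PySem.Dict.getD_insert]
    by_cases hk : k = k0
    · subst hk
      rw [if_pos rfl, PySem.Set.mem_add]
      rw [h.1 k z]; tauto
    · rw [if_neg hk, h.1 k z]; tauto
  · intro k s hs
    rw [hmod, PySem.Dict.get?_insert] at hs
    by_cases hk : k = k0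
    · rw [if_pos hk] at hs
      injection hs with hs; subst hs
      refine ⟨PySem.Set.nodup_add _ _ (hnd k0), ?_⟩
      rw [PySem.Set.add_eq_ite]
      split_ifs with hmem
      · exact List.ne_nil_of_mem hmem
      · simp
    · rw [if_neg hk] at hs
      exact h.2 k s hs

-- the bundled invariant: the three dicts index exactly the current rook list
def RookInv (rooks : List (Int × Int × Int))
    (ix : PySem.Dict (Int × Int) (PySem.Set Int) × PySem.Dict (Int × Int) (PySem.Set Int) × PySem.Dict (Int × Int) (PySem.Set Int)) : Prop :=
  GoodDict ix.1 (fun k z => (k.1, k.2, z) ∈ rooks) ∧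
  GoodDict ix.2.1 (fun k z => (k.2 + z, k.1 + z, z) ∈ rooks) ∧
  GoodDict ix.2.2 (fun k z => (k.2, k.1 + z, z) ∈ rooks)

theorem RookInv_bAdd {rooks : List (Int × Int × Int)} {ix} (h : RookInv rooks ix) (r : Int × Int × Int) :
    RookInv (rooks ++ [r]) (bAdd ix r) := by
  obtain ⟨x, y, z0⟩ := r
  refine ⟨GoodDict_congr (GoodDict_add h.1 (x, y) z0) ?_,
          GoodDict_congr (GoodDict_add h.2.1 (y - z0, x - z0) z0) ?_,
          GoodDict_congr (GoodDict_add h.2.2 (y - z0, x) z0) ?_⟩ <;>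
  · rintro ⟨a, b⟩ z
    simp only [List.mem_append, List.mem_singleton, Prod.ext_iff]
    constructor <;> (rintro (h | h) <;> [left; right] <;> [exact h; omega])

theorem RookInv_init (l : List (Int × Int × Int)) :
    RookInv l (l.foldl bAdd (PySem.Dict.empty, PySem.Dict.empty, PySem.Dict.empty)) := by
  induction l using List.reverseRecOn with
  | nil =>
    refine ⟨GoodDict_congr GoodDict_empty ?_, GoodDict_congr GoodDict_empty ?_,
            GoodDict_congr GoodDict_empty ?_⟩ <;> simp
  | append_singleton l r ih =>
    rw [List.foldl_append, List.foldl_cons, List.foldl_nil]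
    exact RookInv_bAdd ih r

theorem hit3_eq_any {rooks : List (Int × Int × Int)} {ix} (h : RookInv rooks ix) (r1 : Int × Int × Int) :
    (pyHit (ix.1.get? (r1.1, r1.2.1)) r1.2.2
      || pyHit (ix.2.1.get? (r1.2.1 - r1.2.2, r1.1 - r1.2.2)) r1.2.2
      || pyHit (ix.2.2.get? (r1.2.1 - r1.2.2, r1.1)) r1.2.2)
      = rooks.any (fun r2 => connorAttacking r1 r2) := by
  obtain ⟨x, y, z⟩ := r1
  rw [Bool.eq_iff_iff]
  simp only [Bool.or_eq_true, List.any_eq_true]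
  rw [pyHit_iff h.1, pyHit_iff h.2.1, pyHit_iff h.2.2]
  simp only [connor_iff]
  constructor
  · rintro ((⟨w, hwz, hmem⟩ | ⟨w, hwz, hmem⟩) | ⟨w, hwz, hmem⟩)
    · exact ⟨(x, y, w), hmem, by simp; omega⟩
    · exact ⟨((x - z) + w, (y - z) + w, w), hmem, by simp; omega⟩
    · exact ⟨(x, (y - z) + w, w), hmem, by simp; omega⟩
  · rintro ⟨⟨x2, y2, z2⟩, hmem, hcond⟩
    simp only [ne_eq] at hcond
    rcases hcond with ⟨hz, (⟨hx, hy⟩ | ⟨hdiag, (hx | hx)⟩)⟩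
    · exact Or.inl (Or.inl ⟨z2, by omega, by rw [hx, hy]; exact hmem⟩)
    · refine Or.inl (Or.inr ⟨z2, by omega, ?_⟩)
      have : (x - z + z2, y - z + z2, z2) = (x2, y2, z2) := by simp; omega
      rw [this]; exact hmem
    · refine Or.inr ⟨z2, by omega, ?_⟩
      have : (x, y - z + z2, z2) = (x2, y2, z2) := by simp; omega
      rw [this]; exact hmem

theorem loop_eq (l1 : List (Int × Int × Int)) :
    ∀ rooks ix, RookInv rooks ix → l1.foldl aStep rooks = (l1.foldl bStep (rooks, ix)).1 := by
  induction l1 with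
  | nil => intro rooks ix _; rfl
  | cons r1 rest ih =>
    intro rooks ix hinv
    simp only [List.foldl_cons]
    have hcond : (badOf r1 rooks == 0)
        = !(pyHit (ix.1.get? (r1.1, r1.2.1)) r1.2.2
            || pyHit (ix.2.1.get? (r1.2.1 - r1.2.2, r1.1 - r1.2.2)) r1.2.2
            || pyHit (ix.2.2.get? (r1.2.1 - r1.2.2, r1.1)) r1.2.2) := by
      rw [badOf_eq_zero_iff, hit3_eq_any hinv]
    by_cases hb : (badOf r1 rooks == 0) = true
    · have hh : (!(pyHit (ix.1.get? (r1.1, r1.2.1)) r1.2.2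
            || pyHit (ix.2.1.get? (r1.2.1 - r1.2.2, r1.1 - r1.2.2)) r1.2.2
            || pyHit (ix.2.2.get? (r1.2.1 - r1.2.2, r1.1)) r1.2.2)) = true := hcond ▸ hb
      rw [aStep, if_pos hb, bStep, if_pos hh]
      exact ih _ _ (RookInv_bAdd hinv r1)
    · have hh : ¬ (!(pyHit (ix.1.get? (r1.1, r1.2.1)) r1.2.2
            || pyHit (ix.2.1.get? (r1.2.1 - r1.2.2, r1.1 - r1.2.2)) r1.2.2
            || pyHit (ix.2.2.get? (r1.2.1 - r1.2.2, r1.1)) r1.2.2)) = true := fun h => hb (hcond ▸ h)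
      rw [aStep, if_neg hb, bStep, if_neg hh]
      exact ih _ _ hinv

-- ===== VERDICT (by name: the statement is the Claim_ definition above) =====
theorem mergeRooks_spec : Claim_equal_mergeRooks := by
  intro list1 list2 _
  unfold Spec_mergeRooks mergeRooks mergeRooks_alt
  exact loop_eq list1 list2 _ (RookInv_init list2)
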